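-- pv_equiv track=rewrite | github.com/jeannepurca/PinyaSuri_ECE4_2 | camera.py | _get_detection_filename_summary
-- ===== SOURCE A (Python) =====
-- def _get_detection_filename_summary(detections):
--     """
--     Create concise summary for filename
--     Example: "2H_1MW_1CR" = 2 Healthy, 1 Mealybug Wilt, 1 Crown Rot
--     """
--     if not detections:
--         return "0det"
--
--     class_counts = {}
--     for det in detections:
--         class_name = det['class_name']
--         class_counts[class_name] = class_counts.get(class_name, 0) + 1
--
--     # Abbreviations
--     abbrev = {
--         "Healthy": "H",
--         "Mealybug Wilt Disease": "MW",
--         "Root Rot Disease": "RR",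
--         "Crown Rot Disease": "CR",
--         "Fruit Fasciation Disorder": "FF",
--         "Multiple Crown Disorder": "MC"
--     }
--
--     summary_parts = []
--     for class_name, count in sorted(class_counts.items()):
--         short = abbrev.get(class_name, "UK")
--         summary_parts.append(f"{count}{short}")
--
--     return "_".join(summary_parts) if summary_parts else "0det"
-- ===== SOURCE B (Python) =====
-- def _get_detection_filename_summary(detections):
--     """
--     Create concise summary for filename
--     Example: "2H_1MW_1CR" = 2 Healthy, 1 Mealybug Wilt, 1 Crown Rot
--     """
--     if not detections:
--         return "0det"
--
--     abbrev = {
--         "Healthy": "H",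
--         "Mealybug Wilt Disease": "MW",
--         "Root Rot Disease": "RR",
--         "Crown Rot Disease": "CR",
--         "Fruit Fasciation Disorder": "FF",
--         "Multiple Crown Disorder": "MC"
--     }
--
--     # sort the class names, then scan runs of equal names (no counting dict)
--     names = sorted(det['class_name'] for det in detections)
--     parts = []
--     rest = names
--     while rest:
--         c = rest[0]
--         k = 1
--         while k < len(rest) and rest[k] == c:
--             k += 1
--         parts.append(f"{k}{abbrev.get(c, 'UK')}")
--         rest = rest[k:]
--     return "_".join(parts)
-- ===== Notes on version B (the rewrite author's own statement) =====
-- stated objective: alternative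
-- what changed: Replaces the hash-accumulation counting dict plus sorted(items) with a sort of the class names followed by a single run-length scan of the sorted list.
import Mathlib
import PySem

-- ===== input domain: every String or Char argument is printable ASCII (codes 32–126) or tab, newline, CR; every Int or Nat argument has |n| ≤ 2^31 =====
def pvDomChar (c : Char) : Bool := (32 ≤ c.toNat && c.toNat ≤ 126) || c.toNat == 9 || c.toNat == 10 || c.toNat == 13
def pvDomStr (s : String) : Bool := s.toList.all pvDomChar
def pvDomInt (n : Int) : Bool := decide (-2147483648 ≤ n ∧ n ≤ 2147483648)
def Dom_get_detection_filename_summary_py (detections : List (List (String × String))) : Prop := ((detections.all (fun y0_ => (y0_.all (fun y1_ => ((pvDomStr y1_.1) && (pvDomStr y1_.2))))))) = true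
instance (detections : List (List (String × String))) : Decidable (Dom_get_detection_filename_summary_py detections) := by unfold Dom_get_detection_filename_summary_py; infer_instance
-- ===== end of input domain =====

-- B replaces A's counting dict + sorted(items) with sort-the-names-then-run-length-scan; equal return value on Pre_ (every det has a 'class_name' key).


-- ===== PORT A =====
-- det['class_name']: first match in the assoc list; KeyError (absent key) is excluded by Pre_, ""
-- is never produced on admitted inputs.
def pvClassName (det : List (String × String)) : String :=
  ((PySem.Dict.mk det).get? "class_name").getD ""

def pvAbbrev : PySem.Dict String String := PySem.Dict.mk
  [("Healthy", "H"), ("Mealybug Wilt Disease", "MW"), ("Root Rot Disease", "RR"),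
   ("Crown Rot Disease", "CR"), ("Fruit Fasciation Disorder", "FF"), ("Multiple Crown Disorder", "MC")]

-- sorted(class_counts.items()): dict keys are distinct, so Python's tuple comparison never reaches
-- the counts — keying the stable sort by the first component is exact here.
def get_detection_filename_summary_py (detections : List (List (String × String))) : String :=
  if detections = [] then "0det"
  else
    let class_counts : PySem.Dict String Int :=
      detections.foldl (fun d det =>
        let class_name := pvClassName det
        d.insert class_name (d.getD class_name 0 + 1)) PySem.Dict.empty
    let summary_parts : List String :=
      (PySem.List.sorted class_counts.items (fun p => p.1) false).foldl
        (fun acc p => acc ++ [PySem.Int.toStr p.2 ++ pvAbbrev.getD p.1 "UK"]) []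
    if summary_parts = [] then "0det" else PySem.Str.join "_" summary_parts

-- ===== PORT B =====
-- the while loop over `rest`: the inner scan for k is takeWhile, `rest = rest[k:]` is dropWhile
def pvRunPairs : List String → List (String × Int)
  | [] => []
  | c :: rest =>
      (c, 1 + ((rest.takeWhile (· == c)).length : Int)) :: pvRunPairs (rest.dropWhile (· == c))
termination_by s => s.length
decreasing_by
  simp only [List.length_cons]
  have := List.length_dropWhile_le (· == c) rest
  omega

def get_detection_filename_summary_py_alt (detections : List (List (String × String))) : String :=
  if detections = [] then "0det"
  else
    let names := PySem.List.sorted (detections.map pvClassName) (fun x => x) false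
    let parts := (pvRunPairs names).map (fun p => PySem.Int.toStr p.2 ++ pvAbbrev.getD p.1 "UK")
    PySem.Str.join "_" parts

-- ===== PRECONDITION & SPEC =====
-- Pre_ excludes exactly the inputs where A raises KeyError: a det without a 'class_name' key.
-- 'det has the key "class_name"'; stated on the character lists so that `decide` evaluates fast
def Pre_get_detection_filename_summary_py (detections : List (List (String × String))) : Prop :=
  (detections.all (fun det => det.any (fun p => p.1.data == "class_name".data))) = true
instance (detections : List (List (String × String))) : Decidable (Pre_get_detection_filename_summary_py detections) := by unfold Pre_get_detection_filename_summary_py; infer_instance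
def pvWitness_get_detection_filename_summary_py : (List (List (String × String))) :=
  [[("class_name", "Healthy")], [("class_name", "zz")], [("class_name", "Healthy")]]

def Spec_get_detection_filename_summary_py (detections : List (List (String × String))) (out : String) : Prop := out = get_detection_filename_summary_py_alt detections
instance (detections : List (List (String × String))) (out : String) : Decidable (Spec_get_detection_filename_summary_py detections out) := by unfold Spec_get_detection_filename_summary_py; infer_instance

-- ===== CLAIM (what is proved, stated in full; the proofs are below) =====
def Claim_equal_get_detection_filename_summary_py : Prop := ∀ (detections : List (List (String × String))), Dom_get_detection_filename_summary_py detections → Pre_get_detection_filename_summary_py detections → Spec_get_detection_filename_summary_py detections (get_detection_filename_summary_py detections)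

-- ===== LEMMAS AND PROOFS =====

-- every element of a sorted chain's dropWhile (== c) differs from c
lemma pv_not_mem_dropWhile (c : String) (rest : List String)
    (hch : (c :: rest).Pairwise (· ≤ ·)) : c ∉ rest.dropWhile (· == c) := by
  intro hmem
  have hne : rest.dropWhile (· == c) ≠ [] := List.ne_nil_of_mem hmem
  obtain ⟨hd, tl, he⟩ := List.exists_cons_of_ne_nil hne
  have hhd : (hd == c) = false := by
    have h := List.head_dropWhile_not (· == c) hne
    simpa [he] using h
  have hhd' : hd ≠ c := by simpa using hhd
  have hle : ∀ x ∈ rest, c ≤ x := (List.pairwise_cons.mp hch).1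
  have hsub : List.Sublist (rest.dropWhile (· == c)) rest := List.dropWhile_sublist _
  have hchdw : (rest.dropWhile (· == c)).Pairwise (· ≤ ·) :=
    List.Pairwise.sublist hsub hch.of_cons
  have hchd : (hd :: tl).Pairwise (· ≤ ·) := he ▸ hchdw
  rw [he] at hmem
  rcases List.mem_cons.mp hmem with h | h
  · exact hhd' h.symm
  · have h1 : hd ≤ c := (List.pairwise_cons.mp hchd).1 c h
    have h2 : c ≤ hd := hle hd (hsub.subset (he ▸ List.mem_cons_self))
    exact hhd' (le_antisymm h1 h2)

-- membership and strict ordering of the run pairs of a sorted chain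
lemma pv_runPairs_main (s : List String) :
    s.Pairwise (· ≤ ·) →
    (∀ p : String × Int, p ∈ pvRunPairs s ↔ p.1 ∈ s ∧ p.2 = (s.count p.1 : Int)) ∧
    (pvRunPairs s).Pairwise (fun a b => a.1 < b.1) := by
  induction s using pvRunPairs.induct with
  | case1 => intro _; simp [pvRunPairs]
  | case2 c rest ih =>
    intro hs
    have hsub : List.Sublist (rest.dropWhile (· == c)) rest := List.dropWhile_sublist _
    have hch' : (rest.dropWhile (· == c)).Pairwise (· ≤ ·) :=
      List.Pairwise.sublist hsub hs.of_cons
    obtain ⟨ihmem, ihpw⟩ := ih hch'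
    have hle : ∀ x ∈ rest, c ≤ x := (List.pairwise_cons.mp hs).1
    have hnotin : c ∉ rest.dropWhile (· == c) := pv_not_mem_dropWhile c rest hs
    have hlt : ∀ x ∈ rest.dropWhile (· == c), c < x := by
      intro x hx
      rcases lt_or_eq_of_le (hle x (hsub.subset hx)) with h | h
      · exact h
      · exact absurd (h ▸ hx) hnotin
    have htw : ∀ x ∈ rest.takeWhile (· == c), x = c := by
      intro x hx
      simpa using List.mem_takeWhile_imp hx
    have hsplit : rest.takeWhile (· == c) ++ rest.dropWhile (· == c) = rest :=
      List.takeWhile_append_dropWhile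
    have hcount_c : (c :: rest).count c = 1 + (rest.takeWhile (· == c)).length := by
      have h1 : (rest.takeWhile (· == c)).count c = (rest.takeWhile (· == c)).length :=
        List.count_eq_length.mpr (fun b hb => (htw b hb).symm)
      have h2 : (rest.dropWhile (· == c)).count c = 0 := List.count_eq_zero.mpr hnotin
      have h3 : rest.count c = (rest.takeWhile (· == c)).count c
          + (rest.dropWhile (· == c)).count c := by
        conv_lhs => rw [← hsplit]
        exact List.count_append ..
      rw [List.count_cons_self, h3, h1, h2]
      omega
    have hcount_ne : ∀ k : String, k ≠ c →
        (c :: rest).count k = (rest.dropWhile (· == c)).count k := by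
      intro k hk
      have h1 : (rest.takeWhile (· == c)).count k = 0 :=
        List.count_eq_zero.mpr (fun hmem => hk (htw k hmem))
      have h3 : rest.count k = (rest.takeWhile (· == c)).count k
          + (rest.dropWhile (· == c)).count k := by
        conv_lhs => rw [← hsplit]
        exact List.count_append ..
      rw [List.count_cons_of_ne hk.symm, h3, h1]
      omega
    constructor
    · intro p
      simp only [pvRunPairs, List.mem_cons]
      constructor
      · rintro (rfl | hp)
        · refine ⟨Or.inl rfl, ?_⟩
          simp only [hcount_c]
          push_cast
          ring
        · obtain ⟨h1, h2⟩ := (ihmem p).mp hp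
          have hne : p.1 ≠ c := ne_of_gt (hlt p.1 h1)
          refine ⟨Or.inr (hsub.subset h1), ?_⟩
          rw [hcount_ne p.1 hne]
          exact h2
      · rintro ⟨h1, h2⟩
        by_cases hc : p.1 = c
        · left
          have : p.2 = 1 + ((rest.takeWhile (· == c)).length : Int) := by
            rw [h2, hc, hcount_c]; push_cast; ring
          have hp : p = (p.1, p.2) := rfl
          rw [hp, hc, this]
        · right
          have hrest : p.1 ∈ rest := by
            rcases h1 with h | h
            · exact absurd h hc
            · exact h
          have hdw : p.1 ∈ rest.dropWhile (· == c) := by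
            rw [← hsplit] at hrest
            rcases List.mem_append.mp hrest with h | h
            · exact absurd (htw _ h) hc
            · exact h
          exact (ihmem p).mpr ⟨hdw, by rw [← hcount_ne p.1 hc]; exact h2⟩
    · simp only [pvRunPairs]
      refine List.pairwise_cons.mpr ⟨?_, ihpw⟩
      intro q hq
      exact hlt q.1 ((ihmem q).mp hq).1

-- A's sorted items list IS B's run-length list
lemma pv_sorted_items_eq (names : List String) :
    PySem.List.sorted (PySem.Dict.counter names).items (fun p => p.1) false
      = pvRunPairs (PySem.List.sorted names (fun x => x) false) := by
  have hperm : (PySem.List.sorted names (fun x => x) false).Perm names :=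
    PySem.List.sorted_perm ..
  have hch : (PySem.List.sorted names (fun x => x) false).Pairwise (· ≤ ·) := by
    simpa using PySem.List.sorted_pairwise names (fun x => x)
  obtain ⟨hmem, hpw⟩ := pv_runPairs_main _ hch
  apply PySem.List.sorted_eq_of_perm_of_pairwise_lt
  · have hnd1 : (pvRunPairs (PySem.List.sorted names (fun x => x) false)).Nodup :=
      hpw.imp (fun h => by intro he; rw [he] at h; exact lt_irrefl _ h)
    have hnd2 : ((PySem.Dict.counter names).items).Nodup := by
      have hk := PySem.Dict.nodup_keys_counter (xs := names)
      simp only [PySem.Dict.keys] at hk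
      exact hk.of_map
    rw [List.perm_ext_iff_of_nodup hnd1 hnd2]
    intro p
    rw [hmem p, PySem.Dict.items_counter]
    rw [hperm.mem_iff, hperm.count_eq]
    constructor
    · rintro ⟨h1, h2⟩
      rw [List.mem_map]
      exact ⟨p.1, by simpa [PySem.Set.mem_ofList] using h1, by rw [← h2]⟩
    · intro h
      obtain ⟨k, hk, hkeq⟩ := List.mem_map.mp h
      rw [← hkeq]
      exact ⟨by simpa [PySem.Set.mem_ofList] using hk, rfl⟩
  · exact hpw

-- ===== VERDICT (by name: the statement is the Claim_ definition above) =====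
theorem get_detection_filename_summary_py_spec : Claim_equal_get_detection_filename_summary_py := by
  intro detections _ _
  unfold Spec_get_detection_filename_summary_py
  unfold get_detection_filename_summary_py get_detection_filename_summary_py_alt
  by_cases hd : detections = []
  · simp [hd]
  · simp only [hd, if_false]
    have h1 : detections.foldl (fun d det =>
        let class_name := pvClassName det
        d.insert class_name (d.getD class_name 0 + 1)) PySem.Dict.empty
        = PySem.Dict.counter (detections.map pvClassName) := by
      rw [← PySem.Dict.foldl_insert_getD_add_one_eq_counter, List.foldl_map]
    rw [h1, pv_sorted_items_eq, PySem.List.foldl_append_singleton_eq_map]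
    have hne : pvRunPairs (PySem.List.sorted (detections.map pvClassName) (fun x => x) false) ≠ [] := by
      have hlen : (PySem.List.sorted (detections.map pvClassName) (fun x => x) false).length
          = (detections.map pvClassName).length :=
        (PySem.List.sorted_perm ..).length_eq
      cases hcase : PySem.List.sorted (detections.map pvClassName) (fun x => x) false with
      | nil =>
          rw [hcase] at hlen
          simp at hlen
          exact absurd (List.eq_nil_of_length_eq_zero hlen.symm) hd
      | cons a l => simp [pvRunPairs]
    rw [if_neg (by simpa using hne), List.nil_append]
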